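-- pv_equiv track=rewrite | github.com/minibrasiler7/mathpully | interactiveExerciseBrain.py | trouver_diviseur_commun_de_coefficients
-- ===== SOURCE A (Python) =====
-- def trouver_diviseur_commun_de_coefficients(liste_coefficient):
--     liste_diviseurs = []
--     for i in range(2,10):
--         divisible = True
--         for j in range(len(liste_coefficient)):
--             if liste_coefficient[j] % i !=0:
--                 divisible = False
--         if divisible:
--             liste_diviseurs.append(i)
--     return liste_diviseurs
-- ===== SOURCE B (Python) =====
-- def trouver_diviseur_commun_de_coefficients(liste_coefficient):
--     # Reduce the list to the gcd of all coefficients (Euclid, seed 0),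
--     # then a divisor divides every coefficient iff it divides the gcd.
--     g = 0
--     for c in liste_coefficient:
--         c = abs(c)
--         while c:
--             g, c = c, g % c
--     return [i for i in range(2, 10) if g % i == 0]
-- ===== Notes on version B (the rewrite author's own statement) =====
-- stated objective: faster
-- what changed: Replaces the nested 'for each divisor 2..9 scan every coefficient' with a single Euclid-gcd pass over the coefficients (seed 0) followed by eight divisibility checks on the gcd.
import Mathlib
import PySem

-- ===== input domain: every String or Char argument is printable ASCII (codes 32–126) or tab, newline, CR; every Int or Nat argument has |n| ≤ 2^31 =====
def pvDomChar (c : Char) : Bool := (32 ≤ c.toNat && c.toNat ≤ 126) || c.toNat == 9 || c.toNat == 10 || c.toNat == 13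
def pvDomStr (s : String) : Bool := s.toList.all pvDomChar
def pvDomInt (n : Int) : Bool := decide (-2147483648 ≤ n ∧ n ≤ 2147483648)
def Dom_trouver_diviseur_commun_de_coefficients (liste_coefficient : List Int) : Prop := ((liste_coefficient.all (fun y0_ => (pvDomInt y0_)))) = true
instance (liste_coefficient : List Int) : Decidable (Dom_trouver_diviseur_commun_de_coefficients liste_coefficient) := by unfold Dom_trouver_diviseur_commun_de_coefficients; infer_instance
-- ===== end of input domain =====

-- B replaces A's "for each i in 2..9 scan all coefficients" with one gcd pass
-- over the coefficients followed by eight divisibility checks on the gcd.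

-- ===== PORT A =====
def trouver_diviseur_commun_de_coefficients (liste_coefficient : List Int) : List Int :=
  (PySem.List.pyRange 2 10 1).foldl (fun liste_diviseurs i =>
    let divisible := (PySem.List.pyRange 0 (PySem.List.len liste_coefficient) 1).foldl
      (fun divisible j =>
        if PySem.Int.mod (PySem.List.pyGetD liste_coefficient j 0) i ≠ 0 then false
        else divisible) true
    if divisible then liste_diviseurs ++ [i] else liste_diviseurs) []

-- ===== PORT B =====
-- hand-written Euclid loop from Source B ('while c: g, c = c, g % c')
def pvGcdLoop (g c : Nat) : Nat :=
  if h : c = 0 then g else pvGcdLoop c (g % c)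
decreasing_by exact Nat.mod_lt _ (Nat.pos_of_ne_zero h)

def trouver_diviseur_commun_de_coefficients_alt (liste_coefficient : List Int) : List Int :=
  let g : Nat := liste_coefficient.foldl (fun g c => pvGcdLoop g c.natAbs) 0
  (PySem.List.pyRange 2 10 1).filter (fun i => PySem.Int.mod (g : Int) i == 0)

-- ===== PRECONDITION & SPEC =====
def Spec_trouver_diviseur_commun_de_coefficients (liste_coefficient : List Int) (out : List Int) : Prop := out = trouver_diviseur_commun_de_coefficients_alt liste_coefficient
instance (liste_coefficient : List Int) (out : List Int) : Decidable (Spec_trouver_diviseur_commun_de_coefficients liste_coefficient out) := by unfold Spec_trouver_diviseur_commun_de_coefficients; infer_instance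

-- ===== CLAIM (what is proved, stated in full; the proofs are below) =====
def Claim_equal_trouver_diviseur_commun_de_coefficients : Prop := ∀ (liste_coefficient : List Int), Dom_trouver_diviseur_commun_de_coefficients liste_coefficient → Spec_trouver_diviseur_commun_de_coefficients liste_coefficient (trouver_diviseur_commun_de_coefficients liste_coefficient)

-- ===== LEMMAS AND PROOFS =====

theorem pvGcdLoop_eq_gcd (g c : Nat) : pvGcdLoop g c = Nat.gcd c g := by
  induction c using Nat.strong_induction_on generalizing g with
  | _ c ih =>
    rw [pvGcdLoop]
    by_cases h : c = 0
    · simp [h]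
    · rw [dif_neg h, ih (g % c) (Nat.mod_lt _ (Nat.pos_of_ne_zero h))]
      exact (Nat.gcd_rec c g).symm

theorem int_dvd_natCast_gcd (i : Int) (m n : Nat) :
    i ∣ ((Nat.gcd m n : Nat) : Int) ↔ (i ∣ (m : Int) ∧ i ∣ (n : Int)) := by
  rw [← Int.natAbs_dvd_natAbs, ← Int.natAbs_dvd_natAbs (b := (m : Int)),
    ← Int.natAbs_dvd_natAbs (b := (n : Int))]
  simp only [Int.natAbs_natCast]
  exact ⟨fun h => ⟨h.trans (Nat.gcd_dvd_left _ _), h.trans (Nat.gcd_dvd_right _ _)⟩,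
    fun ⟨h1, h2⟩ => Nat.dvd_gcd h1 h2⟩

theorem fold_gcd_dvd (i : Int) (l : List Int) (a : Nat) :
    (i ∣ ((l.foldl (fun g c => pvGcdLoop g c.natAbs) a : Nat) : Int)) ↔
      (i ∣ (a : Int) ∧ ∀ c ∈ l, i ∣ c) := by
  induction l generalizing a with
  | nil => simp
  | cons c cs ih =>
    rw [List.foldl_cons, ih, pvGcdLoop_eq_gcd, int_dvd_natCast_gcd, Int.dvd_natAbs]
    simp only [List.mem_cons]
    constructor
    · rintro ⟨⟨hc, ha⟩, hrest⟩
      exact ⟨ha, fun x hx => hx.elim (fun e => e ▸ hc) (hrest x)⟩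
    · rintro ⟨ha, hall⟩
      exact ⟨⟨hall c (Or.inl rfl), ha⟩, fun x hx => hall x (Or.inr hx)⟩

theorem flag_eq (i : Int) (l : List Int) (d : Bool) :
    l.foldl (fun divisible c => if PySem.Int.mod c i ≠ 0 then false else divisible) d =
      (d && l.all (fun c => PySem.Int.mod c i == 0)) := by
  induction l generalizing d with
  | nil => simp
  | cons c cs ih =>
    simp only [List.foldl_cons, List.all_cons, ih]
    by_cases h : PySem.Int.mod c i = 0 <;> simp [h]

theorem trouver_diviseur_commun_de_coefficients_spec : Claim_equal_trouver_diviseur_commun_de_coefficients := by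
  intro l _
  show _ = _
  unfold trouver_diviseur_commun_de_coefficients trouver_diviseur_commun_de_coefficients_alt
  simp only []
  rw [show (fun (liste_diviseurs : List Int) i =>
      let divisible := (PySem.List.pyRange 0 (PySem.List.len l) 1).foldl
        (fun divisible j =>
          if PySem.Int.mod (PySem.List.pyGetD l j 0) i ≠ 0 then false else divisible) true
      if divisible then liste_diviseurs ++ [i] else liste_diviseurs) =
    (fun (liste_diviseurs : List Int) i =>
      if (l.all (fun c => PySem.Int.mod c i == 0)) then liste_diviseurs ++ [i]
      else liste_diviseurs) from by
      funext acc i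
      simp only [PySem.List.foldl_pyRange_zero_pyGetD l 0
        (fun divisible c => if PySem.Int.mod c i ≠ 0 then false else divisible) true,
        flag_eq, Bool.true_and]]
  rw [show ((PySem.List.pyRange 2 10 1).foldl (fun (acc : List Int) i =>
      if (l.all (fun c => PySem.Int.mod c i == 0)) then acc ++ [i] else acc) []) =
    [] ++ ((PySem.List.pyRange 2 10 1).filter
      (fun i => l.all (fun c => PySem.Int.mod c i == 0))).map id from by
      rw [← PySem.List.foldl_append_if]
      simp [id_eq]]
  simp only [List.map_id, List.nil_append]
  apply List.filter_congr
  intro i _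
  rw [Bool.eq_iff_iff]
  simp only [List.all_eq_true, beq_iff_eq, PySem.Int.mod_eq_zero_iff_dvd,
    fold_gcd_dvd i l 0]
  constructor
  · intro h; exact ⟨dvd_zero i, h⟩
  · exact fun h => h.2

-- ===== VERDICT (by name: the statement is the Claim_ definition above) =====
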